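-- pv_equiv track=rewrite | github.com/xiaoxiaoadai/niukeoj-hw | -合唱队.py | ready
-- ===== SOURCE A (Python) =====
-- def ready(list_l):
--     """
--     获取所有符合条件的排列，并取最长的一种
--     :param list_l: 数字列表
--     :return: 最长的排列的长度
--     """
--     dict_i = dict()
--     for i in range(len(list_l)):
--         res_l = list()
--         res_r = list()
--         for j in range(len(list_l)):
--             if i == j:
--                 continue
--             # 左边的升序子序列
--             if j < i:
--                 if list_l[i] > list_l[j]:
--                     res_l.append(list_l[j])
--             # 右边的降序子序列
--             if j > i:
--                 if list_l[j] > list_l[i]: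
--                     res_r.append(list_l[j])
--         # i 的左右子序列的长度之和
--         dict_i[i] = len(res_l) + len(res_r) - 1
--     # 求dict_i中value值最大的key
--     return len(list_l)-max(dict_i.values()) + 1
-- ===== SOURCE B (Python) =====
-- def ready(list_l):
--     # Each "ascent pair" (j, k) with j < k and list_l[j] < list_l[k] contributes
--     # one unit to both endpoints; one triangular sweep tallies all contributions,
--     # instead of a full scan per index.
--     n = len(list_l)
--     deg = [0] * n
--     for j in range(n):
--         vj = list_l[j]
--         for k in range(j + 1, n):
--             if vj < list_l[k]:
--                 deg[j] += 1
--                 deg[k] += 1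
--     return n - max(deg) + 2
-- ===== Notes on version B (the rewrite author's own statement) =====
-- stated objective: faster
-- what changed: A rescans the whole list for every index to count smaller-left and greater-right elements; B makes one triangular sweep over unordered index pairs, crediting each ascending pair (j,k with l[j]<l[k]) to both endpoints of a degree array once, so every pair is compared exactly once.
import Mathlib
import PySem

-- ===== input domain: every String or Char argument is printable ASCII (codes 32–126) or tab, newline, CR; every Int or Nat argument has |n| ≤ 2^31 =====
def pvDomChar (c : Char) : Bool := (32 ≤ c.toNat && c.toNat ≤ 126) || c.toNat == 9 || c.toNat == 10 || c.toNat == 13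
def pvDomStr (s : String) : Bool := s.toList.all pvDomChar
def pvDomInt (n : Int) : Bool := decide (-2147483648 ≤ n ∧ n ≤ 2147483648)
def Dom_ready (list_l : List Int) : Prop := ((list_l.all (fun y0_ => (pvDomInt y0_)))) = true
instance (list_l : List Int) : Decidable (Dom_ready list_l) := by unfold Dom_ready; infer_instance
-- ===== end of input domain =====

-- B replaces A's per-index full rescans by a single triangular sweep that credits each
-- ascending pair (j,k), j<k, l[j]<l[k], to both of its endpoints once (objective: faster, constant factor).

-- ===== PORT A =====
-- inner 'for j in range(len(list_l))' body of A
def readyLoopJ (list_l : List Int) (i : Int) (p : List Int × List Int) (j : Int) : List Int × List Int :=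
  if i = j then p
  else
    let p :=
      if j < i then
        (if PySem.List.pyGetD list_l i 0 > PySem.List.pyGetD list_l j 0 then
          (p.1 ++ [PySem.List.pyGetD list_l j 0], p.2)
        else p)
      else p
    if j > i then
      (if PySem.List.pyGetD list_l j 0 > PySem.List.pyGetD list_l i 0 then
        (p.1, p.2 ++ [PySem.List.pyGetD list_l j 0])
      else p)
    else p

-- outer 'for i in range(len(list_l))' body of A (indices are in range, so pyGetD is exact)
def readyLoopI (list_l : List Int) (d : PySem.Dict Int Int) (i : Int) : PySem.Dict Int Int :=
  let rr := (PySem.List.pyRange 0 (list_l.length : Int)).foldl (readyLoopJ list_l i) ([], [])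
  d.insert i ((rr.1.length : Int) + (rr.2.length : Int) - 1)

def ready (list_l : List Int) : Int :=
  let dict_i := (PySem.List.pyRange 0 (list_l.length : Int)).foldl (readyLoopI list_l) PySem.Dict.empty
  (list_l.length : Int) - ((PySem.List.max? dict_i.values (fun x => x)).getD 0) + 1

-- ===== PORT B =====
-- inner 'for k in range(j + 1, n)' body of B
def altLoopK (list_l : List Int) (vj : Int) (j : Int) (deg : List Int) (k : Int) : List Int :=
  if vj < PySem.List.pyGetD list_l k 0 then
    let deg := PySem.List.pySetD deg j (PySem.List.pyGetD deg j 0 + 1)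
    PySem.List.pySetD deg k (PySem.List.pyGetD deg k 0 + 1)
  else deg

-- outer 'for j in range(n)' body of B
def altLoopJ (list_l : List Int) (deg : List Int) (j : Int) : List Int :=
  let vj := PySem.List.pyGetD list_l j 0
  (PySem.List.pyRange (j + 1) (list_l.length : Int)).foldl (altLoopK list_l vj j) deg

def ready_alt (list_l : List Int) : Int :=
  let deg := (PySem.List.pyRange 0 (list_l.length : Int)).foldl (altLoopJ list_l) (List.replicate list_l.length 0)
  (list_l.length : Int) - ((PySem.List.max? deg (fun x => x)).getD 0) + 2

-- ===== PRECONDITION & SPEC =====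
-- Pre_ excludes only the empty list, on which A's max(dict_i.values()) raises ValueError.
def Pre_ready (list_l : List Int) : Prop := list_l ≠ []
instance (list_l : List Int) : Decidable (Pre_ready list_l) := by unfold Pre_ready; infer_instance
def pvWitness_ready : List Int := [1]
def Spec_ready (list_l : List Int) (out : Int) : Prop := out = ready_alt list_l
instance (list_l : List Int) (out : Int) : Decidable (Spec_ready list_l out) := by unfold Spec_ready; infer_instance

-- ===== CLAIM (what is proved, stated in full; the proofs are below) =====
def Claim_equal_ready : Prop := ∀ (list_l : List Int), Dom_ready list_l → Pre_ready list_l → Spec_ready list_l (ready list_l)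

-- ===== LEMMAS AND PROOFS =====

-- number of j in [0, m) with l[j] < l[i]
def cLf (l : List Int) (m i : Int) : Int :=
  (((PySem.List.pyRange 0 m).countP (fun j => decide (PySem.List.pyGetD l j 0 < PySem.List.pyGetD l i 0))) : Int)

-- number of k in [i+1, t) with l[i] < l[k]
def cRf (l : List Int) (t i : Int) : Int :=
  (((PySem.List.pyRange (i + 1) t).countP (fun k => decide (PySem.List.pyGetD l i 0 < PySem.List.pyGetD l k 0))) : Int)

-- the per-index total both programs maximise
def cT (l : List Int) (i : Int) : Int := cLf l i i + cRf l (l.length : Int) i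

-- ----- A side -----

theorem readyLoopJ_fold (l : List Int) (i : Int) (js : List Int) (p : List Int × List Int) :
    js.foldl (readyLoopJ l i) p =
      (p.1 ++ (js.filter (fun j => decide (j < i) && decide (PySem.List.pyGetD l i 0 > PySem.List.pyGetD l j 0))).map
          (fun j => PySem.List.pyGetD l j 0),
       p.2 ++ (js.filter (fun j => decide (j > i) && decide (PySem.List.pyGetD l j 0 > PySem.List.pyGetD l i 0))).map
          (fun j => PySem.List.pyGetD l j 0)) := by
  induction js generalizing p with
  | nil => simp
  | cons j js ih =>
    simp only [List.foldl_cons, List.filter_cons]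
    rw [ih]
    unfold readyLoopJ
    by_cases hij : i = j
    · subst hij
      simp
    · by_cases hlt : j < i
      · have hgt : ¬ j > i := by omega
        by_cases hv : PySem.List.pyGetD l i 0 > PySem.List.pyGetD l j 0
        · simp [hij, hlt, hgt, hv]
        · simp [hij, hlt, hgt, hv]
      · by_cases hgt : j > i
        · by_cases hv : PySem.List.pyGetD l j 0 > PySem.List.pyGetD l i 0
          · simp [hij, hlt, hgt, hv]
          · simp [hij, hlt, hgt, hv]
        · omega

theorem filter_left_len (l : List Int) (i : Int) (h0 : 0 ≤ i) (hn : i ≤ (l.length : Int)) :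
    (((PySem.List.pyRange 0 (l.length : Int)).filter
        (fun j => decide (j < i) && decide (PySem.List.pyGetD l i 0 > PySem.List.pyGetD l j 0))).length : Int)
      = cLf l i i := by
  rw [PySem.List.pyRange_one_append 0 i (l.length : Int) h0 hn, List.filter_append]
  have h2 : (PySem.List.pyRange i (l.length : Int)).filter
      (fun j => decide (j < i) && decide (PySem.List.pyGetD l i 0 > PySem.List.pyGetD l j 0)) = [] := by
    rw [List.filter_eq_nil_iff]
    intro j hj
    rw [PySem.List.mem_pyRange_one] at hj
    simp only [Bool.and_eq_true, decide_eq_true_eq]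
    omega
  rw [h2, List.append_nil]
  rw [List.filter_congr (q := fun j => decide (PySem.List.pyGetD l j 0 < PySem.List.pyGetD l i 0))
      (by intro x hx; rw [PySem.List.mem_pyRange_one] at hx
          simp [hx.2])]
  rw [← List.countP_eq_length_filter]
  rfl

theorem filter_right_len (l : List Int) (i : Int) (h0 : 0 ≤ i) (hn : i < (l.length : Int)) :
    (((PySem.List.pyRange 0 (l.length : Int)).filter
        (fun j => decide (j > i) && decide (PySem.List.pyGetD l j 0 > PySem.List.pyGetD l i 0))).length : Int)
      = cRf l (l.length : Int) i := by
  rw [PySem.List.pyRange_one_append 0 (i + 1) (l.length : Int) (by omega) (by omega), List.filter_append]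
  have h2 : (PySem.List.pyRange 0 (i + 1)).filter
      (fun j => decide (j > i) && decide (PySem.List.pyGetD l j 0 > PySem.List.pyGetD l i 0)) = [] := by
    rw [List.filter_eq_nil_iff]
    intro j hj
    rw [PySem.List.mem_pyRange_one] at hj
    simp only [Bool.and_eq_true, decide_eq_true_eq]
    omega
  rw [h2, List.nil_append]
  rw [List.filter_congr (q := fun k => decide (PySem.List.pyGetD l i 0 < PySem.List.pyGetD l k 0))
      (by intro x hx; rw [PySem.List.mem_pyRange_one] at hx
          simp [show i < x by omega])]
  rw [← List.countP_eq_length_filter]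
  rfl

theorem readyLoopI_eq (l : List Int) (d : PySem.Dict Int Int) (i : Int)
    (h0 : 0 ≤ i) (hn : i < (l.length : Int)) :
    readyLoopI l d i = d.insert i (cT l i - 1) := by
  unfold readyLoopI
  rw [readyLoopJ_fold]
  simp only [List.nil_append]
  rw [show ((((PySem.List.pyRange 0 (l.length : Int)).filter
      (fun j => decide (j < i) && decide (PySem.List.pyGetD l i 0 > PySem.List.pyGetD l j 0))).map
      (fun j => PySem.List.pyGetD l j 0)).length : Int)
      = cLf l i i by rw [List.length_map]; exact filter_left_len l i h0 (by omega)]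
  rw [show ((((PySem.List.pyRange 0 (l.length : Int)).filter
      (fun j => decide (j > i) && decide (PySem.List.pyGetD l j 0 > PySem.List.pyGetD l i 0))).map
      (fun j => PySem.List.pyGetD l j 0)).length : Int)
      = cRf l (l.length : Int) i by rw [List.length_map]; exact filter_right_len l i h0 hn]
  rfl

theorem ready_values (l : List Int) :
    ((PySem.List.pyRange 0 (l.length : Int)).foldl (readyLoopI l) PySem.Dict.empty).values
      = (PySem.List.pyRange 0 (l.length : Int)).map (fun i => cT l i - 1) := by
  rw [PySem.List.foldl_congr_mem (PySem.List.pyRange 0 (l.length : Int)) (readyLoopI l)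
      (fun d i => d.insert i (cT l i - 1)) PySem.Dict.empty
      (by intro d i hi
          rw [PySem.List.mem_pyRange_one] at hi
          exact readyLoopI_eq l d i hi.1 hi.2)]
  have hfresh := PySem.Dict.items_foldl_insert_fresh (PySem.List.pyRange 0 (l.length : Int))
      (fun i => i) (fun i => cT l i - 1) (PySem.Dict.empty (κ := Int) (ν := Int))
      (by intro a _; rfl)
      (by simpa using PySem.List.nodup_pyRange_one 0 (l.length : Int))
  simp only [PySem.Dict.values]
  simp only at hfresh
  have hempty : (PySem.Dict.empty : PySem.Dict Int Int).items = [] := rfl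
  rw [hfresh, hempty]
  simp [List.map_map, Function.comp_def]

theorem foldl_max_map_sub_one (t : List Int) (x : Int) :
    (t.map (fun y => y - 1)).foldl max (x - 1) = (t.foldl max x) - 1 := by
  induction t generalizing x with
  | nil => simp
  | cons a t ih =>
    simp only [List.map_cons, List.foldl_cons]
    rw [max_sub_sub_right x a 1]
    exact ih (max x a)

theorem ready_eq_formula (l : List Int) (h : l ≠ []) :
    ready l = (l.length : Int)
      - (((PySem.List.pyRange 1 (l.length : Int)).map (fun i => cT l i)).foldl max (cT l 0)) + 2 := by
  show (l.length : Int) -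
      ((PySem.List.max? ((PySem.List.pyRange 0 (l.length : Int)).foldl (readyLoopI l) PySem.Dict.empty).values
        (fun x => x)).getD 0) + 1 = _
  rw [ready_values]
  have hlen : (0 : Int) < (l.length : Int) := by
    have := List.length_pos_iff.mpr h; omega
  rw [PySem.List.pyRange_one_cons hlen]
  simp only [List.map_cons]
  rw [PySem.List.max?_id_cons]
  rw [show (0 : Int) + 1 = 1 by ring]
  rw [show ((PySem.List.pyRange 1 (l.length : Int)).map (fun i => cT l i - 1))
        = ((PySem.List.pyRange 1 (l.length : Int)).map (fun i => cT l i)).map (fun y => y - 1) by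
      simp [List.map_map, Function.comp]]
  rw [foldl_max_map_sub_one]
  simp only [Option.getD_some]
  ring

-- ----- B side -----

theorem pySetD_map_pyRange (F : Int → Int) (n k : Int) (v : Int) (h0 : 0 ≤ k) (hk : k < n) :
    PySem.List.pySetD ((PySem.List.pyRange 0 n).map F) k v
      = (PySem.List.pyRange 0 n).map (fun i => if i = k then v else F i) := by
  rw [PySem.List.pySetD_of_nonneg _ _ h0]
  apply List.ext_getElem
  · simp
  · intro idx h1 h2
    simp only [List.getElem_set, List.getElem_map, PySem.List.getElem_pyRange_one]
    by_cases he : idx = k.toNat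
    · have h3 : k.toNat = idx := he.symm
      have h4 : (0 : Int) + (idx : Int) = k := by omega
      simp [h3, h4]
    · have h3 : ¬ (k.toNat = idx) := fun hh => he hh.symm
      have h4 : ¬ ((0 : Int) + (idx : Int) = k) := by omega
      simp [h3, h4]
      intro hh
      exact absurd (by omega : (0 : Int) + (idx : Int) = k) h4

-- state after the outer loop has processed rows 0 .. m-1
def Sfun (l : List Int) (m : Nat) (i : Int) : Int :=
  if i < (m : Int) then cT l i else cLf l (m : Int) i

-- state inside row m, columns m+1 .. t-1 processed
def Gfun (l : List Int) (m : Nat) (t i : Int) : Int :=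
  if i < (m : Int) then cT l i
  else if i = (m : Int) then cLf l (m : Int) (m : Int) + cRf l t (m : Int)
  else if i < t then cLf l ((m : Int) + 1) i
  else cLf l (m : Int) i

theorem cRf_succ (l : List Int) (m t : Int) (h : m + 1 ≤ t) :
    cRf l (t + 1) m = cRf l t m + (if PySem.List.pyGetD l m 0 < PySem.List.pyGetD l t 0 then 1 else 0) := by
  unfold cRf
  rw [PySem.List.pyRange_one_succ_right h, List.countP_append]
  by_cases hv : PySem.List.pyGetD l m 0 < PySem.List.pyGetD l t 0 <;>
    simp [List.countP_cons, List.countP_nil, hv]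

theorem cLf_succ (l : List Int) (m i : Int) (h : 0 ≤ m) :
    cLf l (m + 1) i = cLf l m i + (if PySem.List.pyGetD l m 0 < PySem.List.pyGetD l i 0 then 1 else 0) := by
  unfold cLf
  rw [PySem.List.pyRange_one_succ_right h, List.countP_append]
  by_cases hv : PySem.List.pyGetD l m 0 < PySem.List.pyGetD l i 0 <;>
    simp [List.countP_cons, List.countP_nil, hv]

theorem inner_char (l : List Int) (m : Nat) (hm : (m : Int) < (l.length : Int)) :
    ∀ (d : Nat), (m : Int) + 1 + (d : Int) ≤ (l.length : Int) →
      (PySem.List.pyRange ((m : Int) + 1) ((m : Int) + 1 + (d : Int))).foldl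
          (altLoopK l (PySem.List.pyGetD l (m : Int) 0) (m : Int))
          ((PySem.List.pyRange 0 (l.length : Int)).map (Sfun l m))
        = (PySem.List.pyRange 0 (l.length : Int)).map (Gfun l m ((m : Int) + 1 + (d : Int))) := by
  intro d
  induction d with
  | zero =>
    intro _
    simp only [Nat.cast_zero, add_zero]
    rw [PySem.List.pyRange_one_eq_nil (a := (m : Int) + 1) (b := (m : Int) + 1) (by omega)]
    simp only [List.foldl_nil]
    apply List.map_congr_left
    intro i hi
    rw [PySem.List.mem_pyRange_one] at hi
    unfold Sfun Gfun
    by_cases h1 : i < (m : Int)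
    · simp [h1]
    · by_cases h2 : i = (m : Int)
      · have hR : cRf l ((m : Int) + 1) (m : Int) = 0 := by
          unfold cRf
          rw [PySem.List.pyRange_one_eq_nil (by omega)]
          simp
        simp only [h1, if_false, h2, if_pos rfl]
        rw [hR]
        simp only [if_true, add_zero]
        try ring
      · have h3 : ¬ i < (m : Int) + 1 := by omega
        simp [h1, h2, h3]
  | succ d ih =>
    intro hd
    have hle : ((m : Int) + 1 + (d : Int)) ≤ (l.length : Int) := by push_cast at hd ⊢; omega
    rw [show ((m : Int) + 1 + ((d : Nat) + 1 : Nat)) = ((m : Int) + 1 + (d : Int)) + 1 by push_cast; ring]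
    rw [PySem.List.pyRange_one_succ_right (by omega), List.foldl_append, ih hle]
    set t : Int := (m : Int) + 1 + (d : Int) with ht
    have h0t : 0 ≤ t := by omega
    have htn : t < (l.length : Int) := by push_cast at hd; omega
    have htm : ¬ t = (m : Int) := by omega
    have htm2 : ¬ ((m : Int) = t) := by omega
    have htm' : ¬ t < (m : Int) := by omega
    have htt : ¬ t < t := by omega
    have htt1 : t < t + 1 := by omega
    have hmm : ¬ ((m : Int) < (m : Int)) := by omega
    have hmt1 : (m : Int) < t + 1 := by omega
    simp only [List.foldl_cons, List.foldl_nil]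
    unfold altLoopK
    have hGm : PySem.List.pyGetD ((PySem.List.pyRange 0 (l.length : Int)).map (Gfun l m t)) (m : Int) 0
        = Gfun l m t (m : Int) :=
      PySem.List.pyGetD_map_pyRange_of_nonneg _ _ _ _ (by omega) (by omega)
    by_cases hv : PySem.List.pyGetD l (m : Int) 0 < PySem.List.pyGetD l t 0
    · simp only [hv, if_pos]
      rw [hGm, pySetD_map_pyRange _ _ _ _ (by omega) (by omega)]
      rw [PySem.List.pyGetD_map_pyRange_of_nonneg _ _ _ _ h0t htn]
      rw [pySetD_map_pyRange _ _ _ _ h0t htn]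
      apply List.map_congr_left
      intro i hi
      rw [PySem.List.mem_pyRange_one] at hi
      by_cases h1 : i = t
      · rw [h1]
        simp only [if_pos rfl, htm, if_false]
        rw [show Gfun l m t t = cLf l (m : Int) t by
          unfold Gfun; rw [if_neg htm', if_neg htm, if_neg htt]]
        rw [show Gfun l m (t + 1) t = cLf l ((m : Int) + 1) t by
          unfold Gfun; rw [if_neg htm', if_neg htm, if_pos htt1]]
        rw [cLf_succ l (m : Int) t (by omega), if_pos hv]
        simp only [if_true]
        try ring
      · rw [if_neg h1]
        by_cases h2 : i = (m : Int)
        · rw [h2]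
          simp only [if_pos rfl]
          rw [show Gfun l m t (m : Int) = cLf l (m : Int) (m : Int) + cRf l t (m : Int) by
            unfold Gfun; rw [if_neg hmm, if_pos rfl]]
          rw [show Gfun l m (t + 1) (m : Int) = cLf l (m : Int) (m : Int) + cRf l (t + 1) (m : Int) by
            unfold Gfun; rw [if_neg hmm, if_pos rfl]]
          rw [cRf_succ l (m : Int) t (by omega), if_pos hv]
          simp only [if_true]
          try ring
        · rw [if_neg h2]
          unfold Gfun
          by_cases h3 : i < (m : Int)
          · rw [if_pos h3, if_pos h3]
          · rw [if_neg h3, if_neg h3, if_neg h2, if_neg h2]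
            by_cases h4 : i < t
            · rw [if_pos h4, if_pos (show i < t + 1 by omega)]
            · rw [if_neg h4, if_neg (show ¬ i < t + 1 by omega)]
    · simp only [hv, if_false]
      apply List.map_congr_left
      intro i hi
      rw [PySem.List.mem_pyRange_one] at hi
      unfold Gfun
      by_cases h1 : i < (m : Int)
      · rw [if_pos h1, if_pos h1]
      · rw [if_neg h1, if_neg h1]
        by_cases h2 : i = (m : Int)
        · rw [if_pos h2, if_pos h2]
          rw [cRf_succ l (m : Int) t (by omega), if_neg hv]
          ring
        · rw [if_neg h2, if_neg h2]
          by_cases h3 : i < t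
          · rw [if_pos h3, if_pos (show i < t + 1 by omega)]
          · by_cases h4 : i = t
            · rw [if_neg h3, if_pos (show i < t + 1 by omega)]
              rw [h4, cLf_succ l (m : Int) t (by omega), if_neg hv]
              ring
            · rw [if_neg h3, if_neg (show ¬ i < t + 1 by omega)]

theorem outer_char (l : List Int) :
    ∀ (m : Nat), (m : Int) ≤ (l.length : Int) →
      (PySem.List.pyRange 0 (m : Int)).foldl (altLoopJ l) (List.replicate l.length 0)
        = (PySem.List.pyRange 0 (l.length : Int)).map (Sfun l m) := by
  intro m
  induction m with
  | zero =>
    intro _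
    rw [PySem.List.pyRange_one_eq_nil (by omega)]
    simp only [List.foldl_nil]
    symm
    rw [List.eq_replicate_iff]
    constructor
    · simp [PySem.List.length_pyRange_one]
    · intro b hb
      rw [List.mem_map] at hb
      obtain ⟨i, hi, hb⟩ := hb
      rw [PySem.List.mem_pyRange_one] at hi
      unfold Sfun cLf at hb
      rw [PySem.List.pyRange_one_eq_nil (by omega)] at hb
      simp at hb
      omega
  | succ m ih =>
    intro hm
    have hm' : (m : Int) < (l.length : Int) := by push_cast at hm; omega
    have hcast : ((m + 1 : Nat) : Int) = (m : Int) + 1 := by push_cast; ring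
    rw [hcast, PySem.List.pyRange_one_succ_right (by omega), List.foldl_append, ih (by omega)]
    simp only [List.foldl_cons, List.foldl_nil]
    unfold altLoopJ
    have hd : ((m : Int) + 1 + ((l.length - (m + 1) : Nat) : Int)) = (l.length : Int) := by
      push_cast at hm ⊢; omega
    have hic := inner_char l m hm' (l.length - (m + 1)) (by rw [hd])
    rw [hd] at hic
    rw [hic]
    apply List.map_congr_left
    intro i hi
    rw [PySem.List.mem_pyRange_one] at hi
    unfold Gfun Sfun cT
    rw [hcast]
    by_cases h1 : i < (m : Int)
    · have h2 : i < (m : Int) + 1 := by omega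
      simp [h1, h2]
    · by_cases h2 : i = (m : Int)
      · have h3 : (m : Int) < (m : Int) + 1 := by omega
        simp [h1, h2, h3]
      · have h3 : ¬ i < (m : Int) + 1 := by omega
        have h4 : i < (l.length : Int) := hi.2
        simp [h1, h2, h3, h4]

theorem ready_alt_eq_formula (l : List Int) (h : l ≠ []) :
    ready_alt l = (l.length : Int)
      - (((PySem.List.pyRange 1 (l.length : Int)).map (fun i => cT l i)).foldl max (cT l 0)) + 2 := by
  show (l.length : Int) -
      ((PySem.List.max? ((PySem.List.pyRange 0 (l.length : Int)).foldl (altLoopJ l) (List.replicate l.length 0))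
        (fun x => x)).getD 0) + 2 = _
  rw [outer_char l l.length (by omega)]
  have hmap : (PySem.List.pyRange 0 (l.length : Int)).map (Sfun l l.length)
      = (PySem.List.pyRange 0 (l.length : Int)).map (fun i => cT l i) := by
    apply List.map_congr_left
    intro i hi
    rw [PySem.List.mem_pyRange_one] at hi
    unfold Sfun
    simp [hi.2]
  rw [hmap]
  have hlen : (0 : Int) < (l.length : Int) := by
    have := List.length_pos_iff.mpr h; omega
  rw [PySem.List.pyRange_one_cons hlen]
  simp only [List.map_cons]
  rw [PySem.List.max?_id_cons]
  rw [show (0 : Int) + 1 = 1 by ring]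
  simp only [Option.getD_some]

-- ===== VERDICT (by name: the statement is the Claim_ definition above) =====
theorem ready_spec : Claim_equal_ready := by
  intro l _ hpre
  unfold Spec_ready
  rw [ready_eq_formula l hpre, ready_alt_eq_formula l hpre]
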